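-- pv_equiv track=rewrite | github.com/neuronx2/coverletterbuilder | app.py | extract_candidate_lines_from_text
-- ===== SOURCE A (Python) =====
-- def extract_candidate_lines_from_text(text: str, default_lines: list[str]) -> tuple[list[str], int]:
--     if not default_lines:
--         return [], 0
--     lines = text.split("\n")
--     collected: list[str] = []
--     consumed = 0
--     started = False
--     for line in lines:
--         if not started and not line.strip():
--             consumed += 1
--             continue
--         if not started:
--             started = True
--         if line.startswith(" "):
--             collected.append(line.strip())
--             consumed += 1
--             continue
--         if not line.strip() and collected:
--             consumed += 1
--             continue
--         break
--     if collected: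
--         return collected, consumed
--     return default_lines, len(default_lines)
-- ===== SOURCE B (Python) =====
-- def _first_index(lines, start, pred):
--     """Index of the first line at or after `start` satisfying `pred`, else len(lines)."""
--     return next((k for k, line in enumerate(lines[start:], start) if pred(line)), len(lines))
--
-- def extract_candidate_lines_from_text(text: str, default_lines: list[str]) -> tuple[list[str], int]:
--     if not default_lines:
--         return [], 0
--     lines = text.split("\n")
--     # boundary indices instead of a stateful scan:
--     # i = first non-blank line; j = first line after i that is neither indented nor blank
--     i = _first_index(lines, 0, lambda l: bool(l.strip()))
--     if i == len(lines) or not lines[i].startswith(" "):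
--         return default_lines, len(default_lines)
--     j = _first_index(lines, i, lambda l: not l.startswith(" ") and bool(l.strip()))
--     return [l.strip() for l in lines[i:j] if l.startswith(" ")], j
-- ===== Notes on version B (the rewrite author's own statement) =====
-- stated objective: alternative
-- what changed: Instead of a stateful scan with a started flag and running accumulators, B computes two boundary indices by predicate search (first non-blank line i, first neither-indented-nor-blank line j after i) and then builds the result declaratively as a comprehension over the slice lines[i:j], with consumed = j.
import Mathlib
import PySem

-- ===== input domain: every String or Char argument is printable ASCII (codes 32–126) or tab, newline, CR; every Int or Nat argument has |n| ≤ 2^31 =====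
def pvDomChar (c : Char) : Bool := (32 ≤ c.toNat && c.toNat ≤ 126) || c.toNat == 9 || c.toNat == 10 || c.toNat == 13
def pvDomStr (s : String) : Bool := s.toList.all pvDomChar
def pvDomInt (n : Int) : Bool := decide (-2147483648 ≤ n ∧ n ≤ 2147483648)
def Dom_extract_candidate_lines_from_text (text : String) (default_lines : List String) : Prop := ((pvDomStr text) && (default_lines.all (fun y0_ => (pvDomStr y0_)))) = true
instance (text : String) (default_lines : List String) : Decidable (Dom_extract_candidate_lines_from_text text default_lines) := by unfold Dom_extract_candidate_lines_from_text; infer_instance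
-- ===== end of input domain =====

-- B replaces A's stateful flag-and-accumulator scan by computing two boundary indices (first
-- non-blank line, first neither-indented-nor-blank line after it) and a comprehension over the
-- slice between them; objective: alternative decomposition, same cost.

-- ===== PORT A =====
-- A's single for-loop over the lines, carrying (collected, consumed, started); `break` returns the state.
def pvLoopA : List String → List String → Int → Bool → List String × Int
  | [], collected, consumed, _ => (collected, consumed)
  | line :: rest, collected, consumed, started =>
    if !started && (PySem.Str.strip line == "") then
      pvLoopA rest collected (consumed + 1) started
    else
      if PySem.Str.startswith line " " then
        pvLoopA rest (collected ++ [PySem.Str.strip line]) (consumed + 1) true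
      else if (PySem.Str.strip line == "") && !collected.isEmpty then
        pvLoopA rest collected (consumed + 1) true
      else
        (collected, consumed)

def extract_candidate_lines_from_text (text : String) (default_lines : List String) : List String × Int :=
  if default_lines = [] then ([], 0)
  else
    let r := pvLoopA (((PySem.Str.split? text "\n").getD [])) [] 0 false
    if r.1 = [] then (default_lines, (default_lines.length : Int)) else r

-- ===== PORT B =====
-- port of Source B's `_first_index(lines, start, pred)`: it scans enumerate(lines[start:], start),
-- so the port scans the slice carrying the running index; returns len(lines) when nothing matches
-- (equal to start + len(slice) since 0 ≤ start ≤ len(lines) at both call sites).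
def pvFirstIdx (p : String → Bool) : List String → Int → Int
  | [], k => k
  | l :: ls, k => if p l then k else pvFirstIdx p ls (k + 1)

def extract_candidate_lines_from_text_alt (text : String) (default_lines : List String) : List String × Int :=
  if default_lines = [] then ([], 0)
  else
    let lines := (PySem.Str.split? text "\n").getD []
    let i := pvFirstIdx (fun l => !(PySem.Str.strip l == "")) (PySem.List.slice lines (some 0) none) 0
    if i == (lines.length : Int) || !(PySem.Str.startswith ((PySem.List.pyGet? lines i).getD "") " ") then
      (default_lines, (default_lines.length : Int))
    else
      let j := pvFirstIdx (fun l => !(PySem.Str.startswith l " ") && !(PySem.Str.strip l == ""))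
                 (PySem.List.slice lines (some i) none) i
      (((PySem.List.slice lines (some i) (some j)).filter
          (fun l => PySem.Str.startswith l " ")).map PySem.Str.strip, j)

-- ===== PRECONDITION & SPEC =====
def Spec_extract_candidate_lines_from_text (text : String) (default_lines : List String) (out : List String × Int) : Prop := out = extract_candidate_lines_from_text_alt text default_lines
instance (text : String) (default_lines : List String) (out : List String × Int) : Decidable (Spec_extract_candidate_lines_from_text text default_lines out) := by unfold Spec_extract_candidate_lines_from_text; infer_instance

-- ===== CLAIM (what is proved, stated in full; the proofs are below) =====
def Claim_equal_extract_candidate_lines_from_text : Prop := ∀ (text : String) (default_lines : List String), Dom_extract_candidate_lines_from_text text default_lines → Spec_extract_candidate_lines_from_text text default_lines (extract_candidate_lines_from_text text default_lines)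

-- ===== LEMMAS AND PROOFS =====

-- B's search helper returns its start index plus the first index satisfying the predicate.
theorem pvFirstIdx_eq_findIdx (p : String → Bool) (ls : List String) : ∀ (k : Int),
    pvFirstIdx p ls k = k + (ls.findIdx p : Int) := by
  induction ls with
  | nil => intro k; simp [pvFirstIdx]
  | cons l ls ih =>
    intro k
    by_cases h : p l
    · simp [pvFirstIdx, h, List.findIdx_cons]
    · simp only [pvFirstIdx, h, if_false, List.findIdx_cons, Bool.cond_eq_if]
      rw [ih]
      push_cast
      ring

-- A's skip phase: the loop reaches the first non-blank line having counted the blanks before it.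
theorem pvLoopA_skip (ls : List String) : ∀ (k : Int),
    pvLoopA ls [] k false =
      (match ls.drop (ls.findIdx (fun l => !(PySem.Str.strip l == ""))) with
       | [] => ([], k + (ls.findIdx (fun l => !(PySem.Str.strip l == "")) : Int))
       | l :: rest =>
         if PySem.Str.startswith l " " then
           pvLoopA rest [PySem.Str.strip l] (k + (ls.findIdx (fun l => !(PySem.Str.strip l == "")) : Int) + 1) true
         else ([], k + (ls.findIdx (fun l => !(PySem.Str.strip l == "")) : Int))) := by
  induction ls with
  | nil => intro k; simp [pvLoopA]
  | cons l ls ih =>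
    intro k
    by_cases h : (PySem.Str.strip l == "") = true
    · have hp : (fun l => !(PySem.Str.strip l == "")) l = false := by simp [h]
      have hfi : (l :: ls).findIdx (fun l => !(PySem.Str.strip l == "")) =
          ls.findIdx (fun l => !(PySem.Str.strip l == "")) + 1 := by
        simp [List.findIdx_cons, h]
      have hstep : pvLoopA (l :: ls) [] k false = pvLoopA ls [] (k + 1) false := by
        simp [pvLoopA, h]
      rw [hstep, ih, hfi, List.drop_succ_cons,
        show k + 1 + ((ls.findIdx (fun l => !(PySem.Str.strip l == ""))) : Int)
           = k + ((ls.findIdx (fun l => !(PySem.Str.strip l == "")) + 1 : Nat) : Int) by push_cast; ring]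
    · have hs : (PySem.Str.strip l == "") = false := by simpa using h
      have hfi : (l :: ls).findIdx (fun l => !(PySem.Str.strip l == "")) = 0 := by
        simp [List.findIdx_cons, hs]
      rw [hfi]
      simp only [List.drop_zero, Nat.cast_zero, add_zero]
      by_cases hsw : PySem.Str.startswith l " " = true
      · have hswc : PySem.Chars.startswith l.toList [' '] = true := by simpa using hsw
        rw [if_pos hsw]
        simp [pvLoopA, hs, hswc]
      · have hswfc : PySem.Chars.startswith l.toList [' '] = false := by simpa using hsw
        rw [if_neg hsw]
        simp [pvLoopA, hs, hswfc]

-- A's collect phase (flag set, collected non-empty) appends the stripped indented lines up to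
-- the first line that is neither indented nor blank, counting every line before it.
theorem pvLoopA_collect (ls : List String) : ∀ (col : List String) (con : Int), col ≠ [] →
    pvLoopA ls col con true =
      (col ++ ((ls.take (ls.findIdx (fun l => !(PySem.Str.startswith l " ") && !(PySem.Str.strip l == "")))).filter
          (fun l => PySem.Str.startswith l " ")).map PySem.Str.strip,
       con + (ls.findIdx (fun l => !(PySem.Str.startswith l " ") && !(PySem.Str.strip l == "")) : Int)) := by
  induction ls with
  | nil => intro col con _; simp [pvLoopA]
  | cons l ls ih =>
    intro col con hcol
    by_cases hsw : PySem.Str.startswith l " " = true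
    · have hswc : PySem.Chars.startswith l.toList [' '] = true := by simpa using hsw
      have hfi : (l :: ls).findIdx (fun l => !(PySem.Str.startswith l " ") && !(PySem.Str.strip l == ""))
          = ls.findIdx (fun l => !(PySem.Str.startswith l " ") && !(PySem.Str.strip l == "")) + 1 := by
        simp [List.findIdx_cons, hswc]
      have hstep : pvLoopA (l :: ls) col con true
          = pvLoopA ls (col ++ [PySem.Str.strip l]) (con + 1) true := by
        simp [pvLoopA, hswc]
      rw [hstep, ih (col ++ [PySem.Str.strip l]) (con + 1) (by simp), hfi, Prod.mk.injEq]
      constructor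
      · simp [List.take_succ_cons, List.filter_cons, hswc]
      · push_cast; ring
    · have hswfc : PySem.Chars.startswith l.toList [' '] = false := by simpa using hsw
      by_cases hb : (PySem.Str.strip l == "") = true
      · have hfi : (l :: ls).findIdx (fun l => !(PySem.Str.startswith l " ") && !(PySem.Str.strip l == ""))
            = ls.findIdx (fun l => !(PySem.Str.startswith l " ") && !(PySem.Str.strip l == "")) + 1 := by
          simp [List.findIdx_cons, hb]
        have hne : col.isEmpty = false := by simpa [List.isEmpty_iff] using hcol
        have hstep : pvLoopA (l :: ls) col con true = pvLoopA ls col (con + 1) true := by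
          simp [pvLoopA, hswfc, hb, hne]
        rw [hstep, ih col (con + 1) hcol, hfi, Prod.mk.injEq]
        constructor
        · simp [List.take_succ_cons, List.filter_cons, hswfc]
        · push_cast; ring
      · have hbs : (PySem.Str.strip l == "") = false := by simpa using hb
        have hfi : (l :: ls).findIdx (fun l => !(PySem.Str.startswith l " ") && !(PySem.Str.strip l == "")) = 0 := by
          simp [List.findIdx_cons, hswfc, hbs]
        have hstep : pvLoopA (l :: ls) col con true = (col, con) := by
          simp [pvLoopA, hswfc, hbs]
        rw [hstep, hfi]
        simp

-- ===== VERDICT (by name: the statement is the Claim_ definition above) =====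
theorem extract_candidate_lines_from_text_spec : Claim_equal_extract_candidate_lines_from_text := by
  intro text default_lines _
  unfold Spec_extract_candidate_lines_from_text extract_candidate_lines_from_text extract_candidate_lines_from_text_alt
  by_cases hd : default_lines = []
  · simp [hd]
  · simp only [hd, if_false, PySem.List.slice_zero_start, PySem.List.slice_none_none]
    rw [pvFirstIdx_eq_findIdx, pvLoopA_skip]
    set lines := (PySem.Str.split? text "\n").getD [] with hlines
    set d : Nat := lines.findIdx (fun l => !(PySem.Str.strip l == "")) with hdef
    have hdle : d ≤ lines.length := List.findIdx_le_length
    cases hdrop : lines.drop d with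
    | nil =>
      have hdl : d = lines.length := by
        have := List.drop_eq_nil_iff.mp hdrop
        omega
      simp [hdrop, hdl]
    | cons l rest =>
      have hdlt : d < lines.length := by
        by_contra h
        have : lines.drop d = [] := List.drop_eq_nil_iff.mpr (by omega)
        simp [this] at hdrop
      have hget : lines[d]? = some l := by
        have h0 : (lines.drop d)[0]? = some l := by rw [hdrop]; rfl
        rw [List.getElem?_drop] at h0
        simpa using h0
      have hbeq : ((0 + (d : Int)) == (lines.length : Int)) = false := by
        simp only [zero_add, beq_eq_false_iff_ne, ne_eq, Int.natCast_inj]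
        omega
      have hpy : PySem.List.pyGet? lines (0 + (d : Int)) = some l := by
        rw [zero_add, PySem.List.pyGet?_natCast]
        exact hget
      by_cases hsw : PySem.Str.startswith l " " = true
      · -- indented first content line: A collects; B returns the slice comprehension
        have hswc : PySem.Chars.startswith l.toList [' '] = true := by simpa using hsw
        simp only [hdrop, hsw, if_true, hbeq, hpy, Option.getD_some, Bool.not_true,
          Bool.false_or, Bool.false_eq_true, if_false]
        rw [pvLoopA_collect rest [PySem.Str.strip l] (0 + (d : Int) + 1) (by simp)]
        rw [zero_add, PySem.List.slice_from_natCast, hdrop, pvFirstIdx_eq_findIdx]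
        have hql : (fun l => !(PySem.Str.startswith l " ") && !(PySem.Str.strip l == "")) l = false := by
          simp [hswc]
        have hfq : (l :: rest).findIdx (fun l => !(PySem.Str.startswith l " ") && !(PySem.Str.strip l == ""))
            = rest.findIdx (fun l => !(PySem.Str.startswith l " ") && !(PySem.Str.strip l == "")) + 1 := by
          simp [List.findIdx_cons, hswc]
        rw [hfq]
        set e : Nat := rest.findIdx (fun l => !(PySem.Str.startswith l " ") && !(PySem.Str.strip l == "")) with hedef
        have hj : (d : Int) + ((e + 1 : Nat) : Int) = ((d + (e + 1) : Nat) : Int) := by push_cast; ring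
        rw [hj, PySem.List.slice_natCast, hdrop]
        have htake : ((l :: rest).take (d + (e + 1) - d)) = l :: rest.take e := by
          have : d + (e + 1) - d = e + 1 := by omega
          simp [this]
        rw [htake]
        simp only [List.filter_cons, hswc, if_true, List.map_cons, List.singleton_append]
        rw [if_neg (List.cons_ne_nil _ _), Prod.mk.injEq]
        constructor
        · simp [hswc]
        · push_cast; ring
      · -- first content line not indented: both sides fall back to default_lines
        have hswfc : PySem.Chars.startswith l.toList [' '] = false := by simpa using hsw
        simp [hdrop, hbeq, hpy, hget, hswfc]
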